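-- pv_equiv track=rewrite | github.com/kipiek-ksu/programming-141-2020 | labs/andrey_gluschuk/lab_6/task_1/task_1.py | digit_sum_count
-- ===== SOURCE A (Python) =====
-- def digit_sum_count(x):
--     """
--     Counts the number of digits and the sum of digits in a number.
--     Outputs a tuple of the number of digits and sum of digits.
--     """
--     digit_count = 0
--     sum_count = 0
--     temp = abs(x)
--     if x == 0:
--         digit_count = 1
--     while temp > 0:
--         digit_count += 1
--         sum_count += temp % 10
--         temp //= 10
--     return digit_count, sum_count
-- ===== SOURCE B (Python) =====
-- def digit_sum_count(x):
--     """
--     Counts the number of digits and the sum of digits in a number.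
--     Outputs a tuple of the number of digits and sum of digits.
--     """
--     s = str(abs(x))
--     return len(s), sum(int(c) for c in s)
-- ===== Notes on version B (the rewrite author's own statement) =====
-- stated objective: idiomatic
-- what changed: Replaces the modulus-and-division arithmetic loop (with a special zero branch) with the decimal string of abs(x): digit count = len(str(abs(x))), digit sum = sum of its characters; zero needs no special case.
import Mathlib
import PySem

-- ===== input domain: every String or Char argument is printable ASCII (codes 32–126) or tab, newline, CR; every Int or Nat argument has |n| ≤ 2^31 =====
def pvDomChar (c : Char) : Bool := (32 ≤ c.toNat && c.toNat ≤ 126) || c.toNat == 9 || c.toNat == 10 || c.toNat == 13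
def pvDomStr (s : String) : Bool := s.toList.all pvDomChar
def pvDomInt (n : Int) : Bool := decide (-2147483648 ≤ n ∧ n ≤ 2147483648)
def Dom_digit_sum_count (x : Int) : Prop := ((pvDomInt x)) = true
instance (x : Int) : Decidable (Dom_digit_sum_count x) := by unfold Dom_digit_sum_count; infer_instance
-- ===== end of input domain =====

-- B replaces A's modulus-and-division arithmetic loop by the decimal string of abs(x):
-- digit count = len(str(abs(x))), digit sum = sum over its characters (idiomatic; zero needs no special case).

-- ===== PORT A =====
-- the 'while temp > 0' loop, state = (temp, digit_count, sum_count)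
def dscLoop (temp dc sc : Int) : Int × Int :=
  if _h : temp > 0 then
    dscLoop (PySem.Int.floordiv temp 10) (dc + 1) (sc + PySem.Int.mod temp 10)
  else (dc, sc)
termination_by temp.toNat
decreasing_by
  simp only [PySem.Int.floordiv]
  rw [Int.fdiv_eq_ediv_of_nonneg] <;> omega

def digit_sum_count (x : Int) : Int × Int :=
  let digit_count : Int := 0
  let sum_count : Int := 0
  let temp := |x|
  let digit_count := if x = 0 then 1 else digit_count
  dscLoop temp digit_count sum_count

-- ===== PORT B =====
-- sum(int(c) for c in s); int(c) = PySem.Int.ofStr? — it never fails on str(abs x)'s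
-- digit characters, so the .getD 0 default is unreachable (exact on this input)
def digit_sum_count_alt (x : Int) : Int × Int :=
  let s := PySem.Int.toStr |x|
  (PySem.Str.len s, (s.toList.map (fun c => (PySem.Int.ofStr? (String.ofList [c])).getD 0)).sum)

-- ===== PRECONDITION & SPEC =====
def Spec_digit_sum_count (x : Int) (out : Int × Int) : Prop := out = digit_sum_count_alt x
instance (x : Int) (out : Int × Int) : Decidable (Spec_digit_sum_count x out) := by unfold Spec_digit_sum_count; infer_instance

-- ===== CLAIM (what is proved, stated in full; the proofs are below) =====
def Claim_equal_digit_sum_count : Prop := ∀ (x : Int), Dom_digit_sum_count x → Spec_digit_sum_count x (digit_sum_count x)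

-- ===== LEMMAS AND PROOFS =====

-- A's loop, on a natural number, returns digit count and digit sum via Nat.digits.
theorem dscLoop_eq (m : Nat) (dc sc : Int) :
    dscLoop (m : Int) dc sc =
      (dc + (Nat.digits 10 m).length, sc + ((Nat.digits 10 m).sum : Int)) := by
  induction m using Nat.strong_induction_on generalizing dc sc with
  | _ m ih =>
    rw [dscLoop.eq_def]
    by_cases hm : 0 < m
    · have h10 : PySem.Int.floordiv (m : Int) 10 = ((m / 10 : Nat) : Int) := by
        simp only [PySem.Int.floordiv]
        rw [Int.fdiv_eq_ediv_of_nonneg _ (by norm_num)]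
        exact_mod_cast (Int.natCast_div m 10).symm
      have hmod : PySem.Int.mod (m : Int) 10 = ((m % 10 : Nat) : Int) := by
        simp only [PySem.Int.mod]
        rw [Int.fmod_eq_emod]
        push_cast
        simp
      rw [dif_pos (by exact_mod_cast hm : (m : Int) > 0), h10, hmod]
      rw [ih (m / 10) (Nat.div_lt_self hm (by norm_num))]
      rw [Nat.digits_def' (by norm_num : 1 < 10) hm]
      simp only [List.length_cons, List.sum_cons, Prod.mk.injEq]
      push_cast
      constructor <;> ring
    · have : ¬ ((m : Int) > 0) := by omega
      rw [dif_neg this]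
      have : m = 0 := by omega
      subst this
      simp

-- `Nat.toDigitsCore` with enough fuel is the reversed digit-character list (plus acc).
theorem toDigitsCore_eq (m : Nat) : ∀ (fuel : Nat), m < fuel → ∀ (acc : List Char),
    Nat.toDigitsCore 10 fuel m acc =
      (if m = 0 then ['0'] else ((Nat.digits 10 m).map Nat.digitChar).reverse) ++ acc := by
  induction m using Nat.strong_induction_on with
  | _ m ih =>
    intro fuel hf acc
    match fuel, hf with
    | fuel + 1, hf =>
      rw [Nat.toDigitsCore]
      by_cases h0 : m / 10 = 0
      · rw [if_pos h0]
        by_cases hm : m = 0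
        · subst hm; simp; decide
        · rw [if_neg hm]
          have hm' : 0 < m := Nat.pos_of_ne_zero hm
          rw [Nat.digits_def' (by norm_num : 1 < 10) hm', h0]
          simp [Nat.mod_eq_of_lt (by omega : m < 10)]
      · rw [if_neg h0]
        have hm : 0 < m := by
          rcases Nat.eq_zero_or_pos m with h | h
          · exact absurd (by simp [h]) h0
          · exact h
        have hlt : m / 10 < m := Nat.div_lt_self hm (by norm_num)
        rw [ih (m / 10) hlt fuel (by omega) (Nat.digitChar (m % 10) :: acc)]
        rw [if_neg h0, if_neg (by omega : m ≠ 0)]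
        rw [Nat.digits_def' (by norm_num : 1 < 10) hm]
        simp

theorem toDigits_eq (m : Nat) :
    Nat.toDigits 10 m =
      (if m = 0 then ['0'] else ((Nat.digits 10 m).map Nat.digitChar).reverse) := by
  rw [Nat.toDigits, toDigitsCore_eq m (m + 1) (by omega) [], List.append_nil]

-- int("<digit char>") = the digit
theorem ofStr_digitChar (d : Nat) (hd : d < 10) :
    (PySem.Int.ofStr? (String.ofList [Nat.digitChar d])).getD 0 = (d : Int) := by
  interval_cases d <;> decide

theorem sum_map_digitChar (l : List Nat) (hl : ∀ d ∈ l, d < 10) :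
    ((l.map Nat.digitChar).map (fun c => (PySem.Int.ofStr? (String.ofList [c])).getD 0)).sum
      = ((l.sum : Nat) : Int) := by
  induction l with
  | nil => simp
  | cons d t iht =>
    simp only [List.map_cons, List.sum_cons, List.map_map]
    rw [Function.comp_def, ofStr_digitChar d (hl d (by simp))]
    have := iht (fun e he => hl e (by simp [he]))
    simp only [List.map_map, Function.comp_def] at this
    rw [this]
    push_cast
    ring

theorem digit_sum_count_spec' (x : Int) : digit_sum_count x = digit_sum_count_alt x := by
  have hchars : (PySem.Int.toStr ((x.natAbs : Nat) : Int)).toList = Nat.toDigits 10 x.natAbs := by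
    rw [PySem.Int.toList_toStr, PySem.Int.toChars]
    rw [if_neg (by omega : ¬ ((x.natAbs : Int) < 0)), Int.toNat_natCast]
  have habs : |x| = ((x.natAbs : Nat) : Int) := by
    rcases abs_cases x with ⟨h1, h2⟩ | ⟨h1, h2⟩ <;> omega
  unfold digit_sum_count digit_sum_count_alt
  rw [habs, dscLoop_eq]
  simp only [PySem.Str.len, hchars, toDigits_eq]
  by_cases hx : x = 0
  · subst hx
    simp
    decide
  · have hna : x.natAbs ≠ 0 := Int.natAbs_ne_zero.mpr hx
    rw [if_neg hx, if_neg hna]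
    have hlt : ∀ d ∈ Nat.digits 10 x.natAbs, d < 10 := fun d hd =>
      Nat.digits_lt_base (by norm_num) hd
    simp only [Prod.mk.injEq]
    constructor
    · simp
    · rw [List.map_reverse, List.sum_reverse, sum_map_digitChar _ hlt]
      simp

-- ===== VERDICT (by name: the statement is the Claim_ definition above) =====
theorem digit_sum_count_spec : Claim_equal_digit_sum_count := by
  intro x _
  exact digit_sum_count_spec' x
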